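-- pv_equiv track=rewrite | github.com/sehagler/drug_targetability | lib/pathway_lattice.py | _create_lattice_dict
-- ===== SOURCE A (Python) =====
-- def _create_lattice_dict(reactome_pathways_relation):
--     all_pathways = []
--     parents = []
--     children = []
--     for item in reactome_pathways_relation:
--         all_pathways.extend(item)
--         parents.append(item[0])
--         children.append(item[1])
--     all_pathways = list(set(all_pathways))
--     singletons = list(set(children) - set(parents))
--     lattice_dict = {}
--     for item in reactome_pathways_relation:
--         if item[0] in lattice_dict.keys():
--             lattice_dict[item[0]].add(item[1])
--         else:
--             lattice_dict[item[0]] = set(item)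
--     for parent in parents:
--         children = lattice_dict[parent]
--         for key in lattice_dict.keys():
--             if parent in lattice_dict[key]:
--                 lattice_dict[key] |= children
--     for singleton in singletons:
--         lattice_dict[singleton] = set([singleton])
--     lattice_dict['TOP'] = set(all_pathways)
--     lattice_dict['BOTTOM'] = set()
--     return lattice_dict
-- ===== SOURCE B (Python) =====
-- def _create_lattice_dict(reactome_pathways_relation):
--     lattice_dict = {}
--     children = []
--     top = set()
--     for parent, child in reactome_pathways_relation:
--         children.append(child)
--         top.add(parent)
--         top.add(child)
--         if parent in lattice_dict:
--             lattice_dict[parent].add(child)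
--         else:
--             lattice_dict[parent] = {parent, child}
--     # inverted index: element -> set of keys whose set contains it
--     occ = {}
--     for key, s in lattice_dict.items():
--         for elem in s:
--             occ.setdefault(elem, set()).add(key)
--     # propagation: only the keys that actually contain the parent are touched
--     for parent, _ in reactome_pathways_relation:
--         ch = lattice_dict[parent]
--         for key in list(occ.get(parent, ())):
--             new = ch - lattice_dict[key]
--             lattice_dict[key] |= ch
--             for elem in new:
--                 occ.setdefault(elem, set()).add(key)
--     for child in dict.fromkeys(children):
--         if child not in lattice_dict:
--             lattice_dict[child] = {child}
--     lattice_dict['TOP'] = top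
--     lattice_dict['BOTTOM'] = set()
--     return lattice_dict
-- ===== Notes on version B (the rewrite author's own statement) =====
-- stated objective: faster
-- what changed: The propagation phase no longer rescans every dict key for every parent occurrence; B maintains an inverted index (element -> set of keys whose value-set contains it), updated incrementally as sets grow, so each parent touches only the keys that actually contain it; singletons are likewise found by one pass over the children instead of building two sets and subtracting.
import Mathlib
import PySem

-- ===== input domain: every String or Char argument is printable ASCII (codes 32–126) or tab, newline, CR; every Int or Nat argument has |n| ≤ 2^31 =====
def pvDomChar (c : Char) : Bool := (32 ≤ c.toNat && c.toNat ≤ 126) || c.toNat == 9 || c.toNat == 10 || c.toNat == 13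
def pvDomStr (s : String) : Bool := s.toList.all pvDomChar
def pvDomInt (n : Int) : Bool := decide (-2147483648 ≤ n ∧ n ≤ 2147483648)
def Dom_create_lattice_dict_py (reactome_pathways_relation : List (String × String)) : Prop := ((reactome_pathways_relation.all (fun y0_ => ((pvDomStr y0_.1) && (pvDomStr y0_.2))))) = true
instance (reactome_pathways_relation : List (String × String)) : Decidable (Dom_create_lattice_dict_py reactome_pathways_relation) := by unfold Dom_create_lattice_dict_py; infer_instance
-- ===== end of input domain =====

-- B replaces A's per-parent rescan of every key by an incrementally maintained
-- inverted index element → keys-containing-it, so each propagation step touches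
-- only the keys that actually contain the parent (objective: faster on sparse lattices).

-- ===== PORT A =====
def create_lattice_dict_py (reactome_pathways_relation : List (String × String)) : List (String × List String) :=
  let acc := reactome_pathways_relation.foldl
    (fun (acc : List String × List String × List String) item =>
      (acc.1 ++ [item.1, item.2], acc.2.1 ++ [item.1], acc.2.2 ++ [item.2])) ([], [], [])
  let all_pathways : List String := PySem.Set.ofList acc.1
  let parents := acc.2.1
  let children := acc.2.2
  let singletons : List String :=
    PySem.Set.diff (PySem.Set.ofList children) (PySem.Set.ofList parents)
  let d0 : PySem.Dict String (List String) := reactome_pathways_relation.foldl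
    (fun d item =>
      if d.contains item.1 then d.modify item.1 [] (fun s => PySem.Set.add s item.2)
      else d.insert item.1 (PySem.Set.ofList [item.1, item.2])) PySem.Dict.empty
  let d1 := parents.foldl (fun d parent =>
      let ch := d.getD parent []
      d.keys.foldl (fun d' key =>
        if PySem.Set.contains (d'.getD key []) parent
        then d'.insert key (PySem.Set.union (d'.getD key []) ch) else d') d) d0
  let d2 := singletons.foldl (fun d s => d.insert s (PySem.Set.ofList [s])) d1
  (((d2.insert "TOP" (PySem.Set.ofList all_pathways)).insert "BOTTOM" PySem.Set.empty)).items

-- ===== PORT B =====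
def create_lattice_dict_py_alt (reactome_pathways_relation : List (String × String)) : List (String × List String) :=
  let st := reactome_pathways_relation.foldl
    (fun (st : PySem.Dict String (List String) × List String × List String) item =>
      (if st.1.contains item.1 then st.1.modify item.1 [] (fun s => PySem.Set.add s item.2)
       else st.1.insert item.1 (PySem.Set.ofList [item.1, item.2]),
       st.2.1 ++ [item.2],
       PySem.Set.add (PySem.Set.add st.2.2 item.1) item.2)) (PySem.Dict.empty, [], PySem.Set.empty)
  let d0 := st.1
  let children := st.2.1
  let top := st.2.2
  let occ0 : PySem.Dict String (List String) := d0.items.foldl (fun o e =>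
      e.2.foldl (fun o elem => o.insert elem (PySem.Set.add (o.getD elem []) e.1)) o) PySem.Dict.empty
  let st2 := reactome_pathways_relation.foldl
    (fun (st : PySem.Dict String (List String) × PySem.Dict String (List String)) item =>
      let ch := st.1.getD item.1 []
      (st.2.getD item.1 []).foldl (fun st' key =>
         (st'.1.insert key (PySem.Set.union (st'.1.getD key []) ch),
          (PySem.Set.diff ch (st'.1.getD key [])).foldl
            (fun o elem => o.insert elem (PySem.Set.add (o.getD elem []) key)) st'.2)) st) (d0, occ0)
  let d1 := st2.1
  let d2 := (PySem.List.dedup children).foldl (fun d c =>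
      if d.contains c then d else d.insert c (PySem.Set.ofList [c])) d1
  (((d2.insert "TOP" top).insert "BOTTOM" PySem.Set.empty)).items

-- ===== PRECONDITION & SPEC =====
def Spec_create_lattice_dict_py (reactome_pathways_relation : List (String × String)) (out : List (String × List String)) : Prop := out = create_lattice_dict_py_alt reactome_pathways_relation
instance (reactome_pathways_relation : List (String × String)) (out : List (String × List String)) : Decidable (Spec_create_lattice_dict_py reactome_pathways_relation out) := by unfold Spec_create_lattice_dict_py; infer_instance

-- ===== CLAIM (what is proved, stated in full; the proofs are below) =====
def Claim_equal_create_lattice_dict_py : Prop := ∀ (reactome_pathways_relation : List (String × String)), Dom_create_lattice_dict_py reactome_pathways_relation → Spec_create_lattice_dict_py reactome_pathways_relation (create_lattice_dict_py reactome_pathways_relation)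

-- ===== LEMMAS AND PROOFS =====

lemma pv_union_absorb (s ch : List String) :
    PySem.Set.union (PySem.Set.union s ch) ch = PySem.Set.union s ch := by
  show PySem.Set.update (PySem.Set.update s ch) ch = PySem.Set.update s ch
  rw [PySem.Set.update_eq_append_filter (PySem.Set.update s ch) ch]
  have h : (PySem.Set.ofList ch).filter (fun y => !(PySem.Set.contains (PySem.Set.update s ch) y)) = [] := by
    rw [List.filter_eq_nil_iff]
    intro y hy
    simp
    intro _
    exact (PySem.Set.mem_ofList ch y).mp hy
  rw [h, List.append_nil]

lemma pv_mk_items (d : PySem.Dict String (List String)) : PySem.Dict.mk d.items = d := by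
  apply PySem.Dict.ext; rfl

lemma pv_get_mk_append (xs ys : List (String × List String)) (k : String)
    (h : k ∉ xs.map Prod.fst) :
    (PySem.Dict.mk (xs ++ ys)).get? k = (PySem.Dict.mk ys).get? k := by
  induction xs with
  | nil => rfl
  | cons x t ih =>
    simp only [List.map_cons, List.mem_cons, not_or] at h
    rw [List.cons_append, PySem.Dict.get?_mk_cons]
    have hb : (x.1 == k) = false := by
      simp only [beq_eq_false_iff_ne, ne_eq]
      exact fun hh => h.1 hh.symm
    rw [hb, if_neg (by simp)]
    exact ih h.2

def pvGmap (p : String) (ch : List String) : (String × List String) → (String × List String) :=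
  fun e => if p ∈ e.2 then (e.1, PySem.Set.union e.2 ch) else e

def pvBuild (d : PySem.Dict String (List String)) (item : String × String) : PySem.Dict String (List String) :=
  if d.contains item.1 then d.modify item.1 [] (fun s => PySem.Set.add s item.2)
  else d.insert item.1 (PySem.Set.ofList [item.1, item.2])

lemma pv_map_fst_gmap (p : String) (ch : List String) (l : List (String × List String)) :
    (l.map (pvGmap p ch)).map Prod.fst = l.map Prod.fst := by
  rw [List.map_map]
  apply List.map_congr_left
  intro e _
  by_cases h : p ∈ e.2 <;> simp [pvGmap, h]

lemma pv_insert_mid (xs ys : List (String × List String)) (k : String) (s v : List String)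
    (hx : k ∉ xs.map Prod.fst) (hy : k ∉ ys.map Prod.fst) :
    (PySem.Dict.mk (xs ++ (k, s) :: ys)).insert k v = PySem.Dict.mk (xs ++ (k, v) :: ys) := by
  have hc : (PySem.Dict.mk (xs ++ (k, s) :: ys)).contains k = true := by
    rw [PySem.Dict.contains_iff_mem_keys]
    show k ∈ (PySem.Dict.mk (xs ++ (k, s) :: ys)).items.map Prod.fst
    simp
  apply PySem.Dict.ext
  rw [PySem.Dict.items_insert_of_contains _ _ hc]
  show (xs ++ (k, s) :: ys).map (fun p => if p.1 == k then (k, v) else p) = _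
  rw [List.map_append, List.map_cons]
  have h1 : xs.map (fun p => if p.1 == k then (k, v) else p) = xs := by
    apply List.map_congr_left ?_ |>.trans (List.map_id xs)
    intro e he
    have : (e.1 == k) = false := by
      simp only [beq_eq_false_iff_ne, ne_eq]
      exact fun hh => hx (hh ▸ List.mem_map_of_mem he)
    simp [this]
  have h2 : ys.map (fun p => if p.1 == k then (k, v) else p) = ys := by
    apply List.map_congr_left ?_ |>.trans (List.map_id ys)
    intro e he
    have : (e.1 == k) = false := by
      simp only [beq_eq_false_iff_ne, ne_eq]
      exact fun hh => hy (hh ▸ List.mem_map_of_mem he)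
    simp [this]
  rw [h1, h2]
  simp

lemma pv_occ_fold_mem (es : List String) (k : String) :
    ∀ (occ : PySem.Dict String (List String)) (e k' : String),
    k' ∈ ((es.foldl (fun o elem => o.insert elem (PySem.Set.add (o.getD elem []) k)) occ).getD e [])
      ↔ k' ∈ occ.getD e [] ∨ (k' = k ∧ e ∈ es) := by
  induction es with
  | nil => simp
  | cons a t ih =>
    intro occ e k'
    rw [List.foldl_cons, ih]
    rw [PySem.Dict.getD_insert]
    by_cases he : e = a
    · subst he
      rw [if_pos rfl]
      constructor
      · rintro (h | h)
        · rcases (PySem.Set.mem_add _ _ _).mp h with h' | h'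
          · exact Or.inl h'
          · exact Or.inr ⟨h', by simp⟩
        · exact Or.inr ⟨h.1, List.mem_cons_of_mem _ h.2⟩
      · rintro (h | ⟨h1, _⟩)
        · exact Or.inl ((PySem.Set.mem_add _ _ _).mpr (Or.inl h))
        · exact Or.inl ((PySem.Set.mem_add _ _ _).mpr (Or.inr h1))
    · rw [if_neg he]
      constructor
      · rintro (h | h)
        · exact Or.inl h
        · exact Or.inr ⟨h.1, List.mem_cons_of_mem _ h.2⟩
      · rintro (h | ⟨h1, h2⟩)
        · exact Or.inl h
        · rcases List.mem_cons.mp h2 with h' | h'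
          · exact absurd h' he
          · exact Or.inr ⟨h1, h'⟩

lemma pv_build_nodup (rel : List (String × String)) :
    ∀ (d : PySem.Dict String (List String)), d.keys.Nodup → (rel.foldl pvBuild d).keys.Nodup := by
  induction rel with
  | nil => intro d h; exact h
  | cons a t ih =>
    intro d h
    rw [List.foldl_cons]
    apply ih
    unfold pvBuild
    by_cases hc : d.contains a.1 = true
    · rw [if_pos hc]
      exact PySem.Dict.nodup_keys_insert _ _ _ h
    · rw [if_neg hc]; exact PySem.Dict.nodup_keys_insert _ _ _ h

lemma pv_build_keys (rel : List (String × String)) :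
    ∀ (d : PySem.Dict String (List String)),
    (rel.foldl pvBuild d).keys = rel.foldl (fun s item => PySem.Set.add s item.1) d.keys := by
  induction rel with
  | nil => intro d; rfl
  | cons a t ih =>
    intro d
    rw [List.foldl_cons, List.foldl_cons, ih]
    congr 1
    unfold pvBuild
    by_cases hc : d.contains a.1 = true
    · rw [if_pos hc]
      rw [PySem.Dict.keys_modify, PySem.Dict.keys_insert_of_contains _ _ hc]
      rw [PySem.Set.add_of_mem ((PySem.Dict.contains_iff_mem_keys _ _).mp hc)]
    · rw [if_neg hc, PySem.Dict.keys_insert_of_not_contains _ _ (by simpa using hc)]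
      rw [PySem.Set.add_of_not_mem
        (fun hm => hc ((PySem.Dict.contains_iff_mem_keys _ _).mpr hm))]

lemma pv_top_fold (rel : List (String × String)) :
    ∀ (s : List String),
    rel.foldl (fun s i => PySem.Set.add (PySem.Set.add s i.1) i.2) s
      = (rel.flatMap (fun i => [i.1, i.2])).foldl PySem.Set.add s := by
  induction rel with
  | nil => intro s; rfl
  | cons a t ih => intro s; rw [List.foldl_cons, ih]; rfl

lemma pv_singl_fold (cs : List String) :
    ∀ (d : PySem.Dict String (List String)), cs.Nodup →
    (cs.foldl (fun d c => if d.contains c then d else d.insert c (PySem.Set.ofList [c])) d).items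
    = d.items ++ (cs.filter (fun c => !(d.contains c))).map (fun c => (c, [c])) := by
  induction cs with
  | nil => intro d _; simp
  | cons a t ih =>
    intro d hnd
    rw [List.foldl_cons, List.filter_cons]
    by_cases hc : d.contains a = true
    · rw [if_pos hc]
      simp only [hc, Bool.not_true]
      rw [ih d hnd.of_cons]
      simp
    · have hcf : d.contains a = false := by simpa using hc
      rw [if_neg hc]
      rw [ih _ hnd.of_cons]
      rw [PySem.Dict.items_insert_of_not_contains _ _ hcf]
      have hfil : t.filter (fun c => !((d.insert a (PySem.Set.ofList [a])).contains c))
          = t.filter (fun c => !(d.contains c)) := by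
        apply List.filter_congr
        intro x hx
        have hxa : (x == a) = false := by
          simp only [beq_eq_false_iff_ne, ne_eq]
          exact fun hh => (List.nodup_cons.mp hnd).1 (hh ▸ hx)
        rw [PySem.Dict.contains_insert, hxa, Bool.false_or]
      rw [hfil]
      simp [hcf]
      rfl

def pvInv (d occ : PySem.Dict String (List String)) : Prop :=
  ∀ e k, k ∈ occ.getD e [] ↔ ∃ s, (k, s) ∈ d.items ∧ e ∈ s

def pvBInner (ch : List String) (st : PySem.Dict String (List String) × PySem.Dict String (List String))
    (key : String) : PySem.Dict String (List String) × PySem.Dict String (List String) :=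
  (st.1.insert key (PySem.Set.union (st.1.getD key []) ch),
   (PySem.Set.diff ch (st.1.getD key [])).foldl
     (fun o elem => o.insert elem (PySem.Set.add (o.getD elem []) key)) st.2)

lemma pv_occ0_build (l : List (String × List String)) :
    ∀ (occ : PySem.Dict String (List String)) (e k : String),
    k ∈ ((l.foldl (fun o e' =>
          e'.2.foldl (fun o elem => o.insert elem (PySem.Set.add (o.getD elem []) e'.1)) o) occ).getD e [])
      ↔ k ∈ occ.getD e [] ∨ ∃ s, (k, s) ∈ l ∧ e ∈ s := by
  induction l with
  | nil => simp
  | cons a t ih =>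
    intro occ e k
    rw [List.foldl_cons, ih, pv_occ_fold_mem]
    constructor
    · rintro ((h | ⟨h1, h2⟩) | ⟨s, hs1, hs2⟩)
      · exact Or.inl h
      · refine Or.inr ⟨a.2, List.mem_cons.mpr (Or.inl ?_), h2⟩
        rw [h1]
      · exact Or.inr ⟨s, List.mem_cons_of_mem _ hs1, hs2⟩
    · rintro (h | ⟨s, hs1, hs2⟩)
      · exact Or.inl (Or.inl h)
      · rcases List.mem_cons.mp hs1 with h' | h'
        · refine Or.inl (Or.inr ⟨by rw [← h'], by rw [← h']; exact hs2⟩)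
        · exact Or.inr ⟨s, h', hs2⟩

lemma pv_a_inner (p : String) (ch : List String) :
    ∀ (post pre : List (String × List String)),
    ((pre ++ post).map Prod.fst).Nodup →
    (post.map Prod.fst).foldl
      (fun d' key => if PySem.Set.contains (d'.getD key []) p
         then d'.insert key (PySem.Set.union (d'.getD key []) ch) else d')
      (PySem.Dict.mk (pre.map (pvGmap p ch) ++ post))
    = PySem.Dict.mk ((pre ++ post).map (pvGmap p ch)) := by
  intro post
  induction post with
  | nil => intro pre _; simp
  | cons a t ih =>
    intro pre hnd
    obtain ⟨k, s⟩ := a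
    have hnd' : ((pre.map Prod.fst) ++ k :: (t.map Prod.fst)).Nodup := by
      simpa using hnd
    rcases List.nodup_append.mp hnd' with ⟨hn1, hn2, hdisj⟩
    have hk_pre : k ∉ pre.map Prod.fst := fun hm => hdisj k hm k (by simp) rfl
    have hk_t : k ∉ t.map Prod.fst := (List.nodup_cons.mp hn2).1
    have hmapfst : (pre.map (pvGmap p ch)).map Prod.fst = pre.map Prod.fst := by
      rw [List.map_map]
      apply List.map_congr_left
      intro e _
      by_cases h : p ∈ e.2 <;> simp [pvGmap, h]
    have hget : (PySem.Dict.mk (pre.map (pvGmap p ch) ++ (k, s) :: t)).get? k = some s := by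
      rw [pv_get_mk_append _ _ _ (by rw [hmapfst]; exact hk_pre)]
      rw [PySem.Dict.get?_mk_cons]
      simp
    have hgetD : (PySem.Dict.mk (pre.map (pvGmap p ch) ++ (k, s) :: t)).getD k [] = s := by
      rw [PySem.Dict.getD_eq_get?_getD, hget]; rfl
    have hshift : pre.map (pvGmap p ch) ++ (pvGmap p ch (k, s)) :: t
        = (pre ++ [(k, s)]).map (pvGmap p ch) ++ t := by
      simp
    have hnd2 : (((pre ++ [(k, s)]) ++ t).map Prod.fst).Nodup := by
      simpa [List.append_assoc] using hnd
    have hfin : ((pre ++ [(k, s)]) ++ t) = pre ++ (k, s) :: t := by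
      simp
    rw [List.map_cons, List.foldl_cons]
    by_cases hp : p ∈ s
    · have hcond : PySem.Set.contains ((PySem.Dict.mk (pre.map (pvGmap p ch) ++ (k, s) :: t)).getD k []) p = true := by
        rw [hgetD]; exact (PySem.Set.contains_iff s p).mpr hp
      rw [hcond]
      simp only [if_true]
      rw [hgetD]
      rw [pv_insert_mid _ _ _ _ _ (by rw [hmapfst]; exact hk_pre) hk_t]
      have hgk : pvGmap p ch (k, s) = (k, PySem.Set.union s ch) := by simp [pvGmap, hp]
      rw [show (PySem.Dict.mk (pre.map (pvGmap p ch) ++ (k, PySem.Set.union s ch) :: t))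
            = PySem.Dict.mk ((pre ++ [(k, s)]).map (pvGmap p ch) ++ t) by rw [← hshift, hgk]]
      rw [ih (pre ++ [(k, s)]) hnd2, hfin]
    · have hcond : PySem.Set.contains ((PySem.Dict.mk (pre.map (pvGmap p ch) ++ (k, s) :: t)).getD k []) p = false := by
        rw [hgetD]
        rcases h : PySem.Set.contains s p with _ | _
        · rfl
        · exact absurd ((PySem.Set.contains_iff s p).mp h) hp
      rw [hcond]
      simp only [Bool.false_eq_true, if_false]
      have hgk : pvGmap p ch (k, s) = (k, s) := by simp [pvGmap, hp]
      rw [show (PySem.Dict.mk (pre.map (pvGmap p ch) ++ (k, s) :: t))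
            = PySem.Dict.mk ((pre ++ [(k, s)]).map (pvGmap p ch) ++ t) by rw [← hshift, hgk]]
      rw [ih (pre ++ [(k, s)]) hnd2, hfin]

lemma pv_a_step (d : PySem.Dict String (List String)) (p : String)
    (h : (d.items.map Prod.fst).Nodup) :
    d.keys.foldl (fun d' key =>
        if PySem.Set.contains (d'.getD key []) p
        then d'.insert key (PySem.Set.union (d'.getD key []) (d.getD p [])) else d') d
    = PySem.Dict.mk (d.items.map (pvGmap p (d.getD p []))) := by
  obtain ⟨l⟩ := d
  have hkeys : (PySem.Dict.mk l).keys = l.map Prod.fst := rfl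
  rw [hkeys]
  have := pv_a_inner p ((PySem.Dict.mk l).getD p []) l [] (by simpa using h)
  simpa using this

lemma pv_cond_step (t : List String) (p k : String) (ch : List String) (e : String × List String)
    (hpe : e.1 = k → p ∈ e.2) :
    (fun e' : String × List String =>
        if e'.1 ∈ t ∧ p ∈ e'.2 then (e'.1, PySem.Set.union e'.2 ch) else e')
      (if e.1 = k then (e.1, PySem.Set.union e.2 ch) else e)
    = if e.1 ∈ k :: t ∧ p ∈ e.2 then (e.1, PySem.Set.union e.2 ch) else e := by
  by_cases hek : e.1 = k
  · rw [if_pos hek]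
    show (if e.1 ∈ t ∧ p ∈ PySem.Set.union e.2 ch
        then (e.1, PySem.Set.union (PySem.Set.union e.2 ch) ch) else (e.1, PySem.Set.union e.2 ch)) = _
    have hR : (if e.1 ∈ k :: t ∧ p ∈ e.2 then (e.1, PySem.Set.union e.2 ch) else e)
        = (e.1, PySem.Set.union e.2 ch) :=
      if_pos ⟨List.mem_cons.mpr (Or.inl hek), hpe hek⟩
    rw [hR]
    by_cases hkt : e.1 ∈ t ∧ p ∈ PySem.Set.union e.2 ch
    · rw [if_pos hkt, pv_union_absorb]
    · rw [if_neg hkt]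
  · rw [if_neg hek]
    show (if e.1 ∈ t ∧ p ∈ e.2 then (e.1, PySem.Set.union e.2 ch) else e) = _
    by_cases het : e.1 ∈ t ∧ p ∈ e.2
    · rw [if_pos het, if_pos ⟨List.mem_cons_of_mem _ het.1, het.2⟩]
    · rw [if_neg het, if_neg (fun hc => het ⟨(List.mem_cons.mp hc.1).resolve_left hek, hc.2⟩)]

lemma pv_b_inner (p : String) (ch : List String) :
    ∀ (L : List String) (d occ : PySem.Dict String (List String)),
    (d.items.map Prod.fst).Nodup →
    pvInv d occ →
    (∀ k ∈ L, ∃ s, (k, s) ∈ d.items ∧ p ∈ s) →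
    (L.foldl (pvBInner ch) (d, occ)).1
        = PySem.Dict.mk (d.items.map (fun e =>
            if e.1 ∈ L ∧ p ∈ e.2 then (e.1, PySem.Set.union e.2 ch) else e))
    ∧ pvInv (L.foldl (pvBInner ch) (d, occ)).1 (L.foldl (pvBInner ch) (d, occ)).2 := by
  intro L
  induction L with
  | nil =>
    intro d occ hnd hI _
    refine ⟨?_, hI⟩
    simp only [List.foldl_nil]
    have : d.items.map (fun e =>
        if e.1 ∈ ([] : List String) ∧ p ∈ e.2 then (e.1, PySem.Set.union e.2 ch) else e) = d.items :=
      (List.map_congr_left (fun e _ => by simp)).trans (List.map_id _)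
    rw [this, pv_mk_items]
  | cons k t ih =>
    intro d occ hnd hI hL
    obtain ⟨sk, hmem, hp⟩ := hL k (by simp)
    have hkeysnd : d.keys.Nodup := hnd
    have hget : d.get? k = some sk := PySem.Dict.get?_of_mem_items d hmem hkeysnd
    have hgetD : d.getD k [] = sk := by rw [PySem.Dict.getD_eq_get?_getD, hget]; rfl
    have hcont : d.contains k = true := by
      rw [PySem.Dict.contains_iff_mem_keys]
      exact List.mem_map_of_mem hmem
    have huniq : ∀ e ∈ d.items, e.1 = k → e.2 = sk := by
      intro e he hek
      have h2 : d.get? e.1 = some e.2 := PySem.Dict.get?_of_mem_items d he hkeysnd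
      rw [hek, hget] at h2
      exact (Option.some.inj h2).symm
    have hd1items : (d.insert k (PySem.Set.union sk ch)).items
        = d.items.map (fun e => if e.1 = k then (e.1, PySem.Set.union e.2 ch) else e) := by
      rw [PySem.Dict.items_insert_of_contains _ _ hcont]
      apply List.map_congr_left
      intro e he
      by_cases hek : e.1 = k
      · rw [if_pos hek, if_pos (by simp [hek])]
        rw [huniq e he hek, hek]
      · rw [if_neg hek, if_neg (by simp [hek])]
    have hstep : pvBInner ch (d, occ) k
        = (d.insert k (PySem.Set.union sk ch),
           (PySem.Set.diff ch sk).foldl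
             (fun o elem => o.insert elem (PySem.Set.add (o.getD elem []) k)) occ) := by
      simp [pvBInner, hgetD]
    have hnd1 : ((d.insert k (PySem.Set.union sk ch)).items.map Prod.fst).Nodup := by
      rw [hd1items, List.map_map]
      have : (Prod.fst ∘ fun e : String × List String =>
          if e.1 = k then (e.1, PySem.Set.union e.2 ch) else e) = Prod.fst := by
        funext e
        by_cases hek : e.1 = k <;> simp [Function.comp, hek]
      rw [this]
      exact hnd
    have hI1 : pvInv (d.insert k (PySem.Set.union sk ch))
        ((PySem.Set.diff ch sk).foldl
          (fun o elem => o.insert elem (PySem.Set.add (o.getD elem []) k)) occ) := by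
      intro e k'
      rw [pv_occ_fold_mem, hI, hd1items]
      constructor
      · rintro (⟨s, hs, hes⟩ | ⟨hk', hed⟩)
        · by_cases hk : k' = k
          · refine ⟨PySem.Set.union sk ch, ?_, ?_⟩
            · refine List.mem_map.mpr ⟨(k, sk), ?_, by simp [hk]⟩
              have hssk : s = sk := huniq (k', s) hs hk
              rw [← hk, ← hssk]
              exact hs
            · have hssk : s = sk := huniq (k', s) hs hk
              rw [(PySem.Set.mem_union sk ch e)]
              exact Or.inl (hssk ▸ hes)
          · refine ⟨s, List.mem_map.mpr ⟨(k', s), hs, by simp [hk]⟩, hes⟩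
        · rcases (PySem.Set.mem_diff ch sk e).mp hed with ⟨hec, _⟩
          refine ⟨PySem.Set.union sk ch, List.mem_map.mpr ⟨(k, sk), hmem, by simp [hk']⟩, ?_⟩
          rw [PySem.Set.mem_union]
          exact Or.inr hec
      · rintro ⟨s, hs, hes⟩
        rcases List.mem_map.mp hs with ⟨e0, he0, heq⟩
        by_cases hek : e0.1 = k
        · rw [if_pos hek] at heq
          have h1 : e0.1 = k' := congrArg Prod.fst heq
          have h2 : PySem.Set.union e0.2 ch = s := congrArg Prod.snd heq
          have hesk : e0.2 = sk := huniq e0 he0 hek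
          rw [← h2] at hes
          rcases (PySem.Set.mem_union e0.2 ch e).mp hes with hie | hie
          · exact Or.inl ⟨sk, by rw [← h1, hek]; exact hmem, hesk ▸ hie⟩
          · by_cases hin : e ∈ sk
            · exact Or.inl ⟨sk, by rw [← h1, hek]; exact hmem, hin⟩
            · exact Or.inr ⟨by rw [← h1, hek], (PySem.Set.mem_diff ch sk e).mpr ⟨hie, hesk ▸ hin⟩⟩
        · rw [if_neg hek] at heq
          exact Or.inl ⟨s, heq ▸ he0, hes⟩
    have hL1 : ∀ k' ∈ t, ∃ s, (k', s) ∈ (d.insert k (PySem.Set.union sk ch)).items ∧ p ∈ s := by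
      intro k' hk'
      obtain ⟨s, hs, hps⟩ := hL k' (List.mem_cons_of_mem _ hk')
      rw [hd1items]
      by_cases hk : k' = k
      · refine ⟨PySem.Set.union sk ch, List.mem_map.mpr ⟨(k, sk), hmem, by simp [hk]⟩, ?_⟩
        rw [PySem.Set.mem_union]; exact Or.inl hp
      · exact ⟨s, List.mem_map.mpr ⟨(k', s), hs, by simp [hk]⟩, hps⟩
    obtain ⟨ihEq, ihInv⟩ := ih (d.insert k (PySem.Set.union sk ch))
      ((PySem.Set.diff ch sk).foldl
        (fun o elem => o.insert elem (PySem.Set.add (o.getD elem []) k)) occ) hnd1 hI1 hL1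
    rw [List.foldl_cons, hstep]
    refine ⟨?_, ihInv⟩
    rw [ihEq, hd1items, List.map_map]
    apply congrArg
    apply List.map_congr_left
    intro e he
    exact pv_cond_step t p k ch e (fun hek => (huniq e he hek) ▸ hp)


lemma pv_parent_step (d occ : PySem.Dict String (List String)) (p : String)
    (hn : (d.items.map Prod.fst).Nodup) (hI : pvInv d occ) :
    ((occ.getD p []).foldl (pvBInner (d.getD p [])) (d, occ)).1
      = PySem.Dict.mk (d.items.map (pvGmap p (d.getD p [])))
    ∧ pvInv ((occ.getD p []).foldl (pvBInner (d.getD p [])) (d, occ)).1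
            ((occ.getD p []).foldl (pvBInner (d.getD p [])) (d, occ)).2 := by
  have hL : ∀ k ∈ occ.getD p [], ∃ s, (k, s) ∈ d.items ∧ p ∈ s := fun k hk => (hI p k).mp hk
  obtain ⟨hEq, hInv⟩ := pv_b_inner p (d.getD p []) (occ.getD p []) d occ hn hI hL
  refine ⟨?_, hInv⟩
  rw [hEq]
  apply congrArg
  apply List.map_congr_left
  intro e he
  unfold pvGmap
  by_cases hpe : p ∈ e.2
  · rw [if_pos ⟨(hI p e.1).mpr ⟨e.2, he, hpe⟩, hpe⟩, if_pos hpe]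
  · rw [if_neg (fun hc => hpe hc.2), if_neg hpe]

lemma pv_outer (ps : List String) :
    ∀ (d occ : PySem.Dict String (List String)),
    (d.items.map Prod.fst).Nodup → pvInv d occ →
    (ps.foldl (fun st p => (st.2.getD p []).foldl (pvBInner (st.1.getD p [])) st) (d, occ)).1
    = ps.foldl (fun d p =>
        d.keys.foldl (fun d' key =>
          if PySem.Set.contains (d'.getD key []) p
          then d'.insert key (PySem.Set.union (d'.getD key []) (d.getD p [])) else d') d) d := by
  induction ps with
  | nil => intros; rfl
  | cons p t ih =>
    intro d occ hn hI
    rw [List.foldl_cons, List.foldl_cons]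
    obtain ⟨hEq, hInv⟩ := pv_parent_step d occ p hn hI
    have hA := pv_a_step d p hn
    rw [hA]
    have hnd2 : (((PySem.Dict.mk (d.items.map (pvGmap p (d.getD p [])))).items.map Prod.fst)).Nodup := by
      show ((d.items.map (pvGmap p (d.getD p []))).map Prod.fst).Nodup
      rw [pv_map_fst_gmap]
      exact hn
    have hnd' : ((((occ.getD p []).foldl (pvBInner (d.getD p [])) (d, occ)).1.items.map Prod.fst)).Nodup := by
      rw [hEq]; exact hnd2
    have := ih ((occ.getD p []).foldl (pvBInner (d.getD p [])) (d, occ)).1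
               ((occ.getD p []).foldl (pvBInner (d.getD p [])) (d, occ)).2 hnd' hInv
    calc (t.foldl (fun st p => (st.2.getD p []).foldl (pvBInner (st.1.getD p [])) st)
            ((occ.getD p []).foldl (pvBInner (d.getD p [])) (d, occ))).1
        = t.foldl _ ((occ.getD p []).foldl (pvBInner (d.getD p [])) (d, occ)).1 := this
      _ = _ := by rw [hEq]

lemma pv_afold_fst (ps : List String) :
    ∀ (d : PySem.Dict String (List String)), (d.items.map Prod.fst).Nodup →
    ((ps.foldl (fun d p =>
        d.keys.foldl (fun d' key =>
          if PySem.Set.contains (d'.getD key []) p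
          then d'.insert key (PySem.Set.union (d'.getD key []) (d.getD p [])) else d') d) d).items.map Prod.fst)
      = d.items.map Prod.fst
    ∧ (((ps.foldl (fun d p =>
        d.keys.foldl (fun d' key =>
          if PySem.Set.contains (d'.getD key []) p
          then d'.insert key (PySem.Set.union (d'.getD key []) (d.getD p [])) else d') d) d).items.map Prod.fst)).Nodup := by
  induction ps with
  | nil => intro d h; exact ⟨rfl, h⟩
  | cons p t ih =>
    intro d h
    rw [List.foldl_cons, pv_a_step d p h]
    have h2 : (((PySem.Dict.mk (d.items.map (pvGmap p (d.getD p [])))).items.map Prod.fst)) = d.items.map Prod.fst := by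
      show ((d.items.map (pvGmap p (d.getD p []))).map Prod.fst) = _
      rw [pv_map_fst_gmap]
    obtain ⟨ih1, ih2⟩ := ih (PySem.Dict.mk (d.items.map (pvGmap p (d.getD p [])))) (by rw [h2]; exact h)
    exact ⟨ih1.trans h2, ih2⟩

lemma pv_main (rel : List (String × String)) :
    create_lattice_dict_py rel = create_lattice_dict_py_alt rel := by
  have hA0 : create_lattice_dict_py rel = (((((PySem.Set.diff (PySem.Set.ofList (rel.foldl (fun (acc : List String × List String × List String) item => (acc.1 ++ [item.1, item.2], acc.2.1 ++ [item.1], acc.2.2 ++ [item.2])) ([], [], [])).2.2) (PySem.Set.ofList (rel.foldl (fun (acc : List String × List String × List String) item => (acc.1 ++ [item.1, item.2], acc.2.1 ++ [item.1], acc.2.2 ++ [item.2])) ([], [], [])).2.1)).foldl (fun (d : PySem.Dict String (List String)) (s : String) => d.insert s (PySem.Set.ofList [s])) ((rel.foldl (fun (acc : List String × List String × List String) item => (acc.1 ++ [item.1, item.2], acc.2.1 ++ [item.1], acc.2.2 ++ [item.2])) ([], [], [])).2.1.foldl (fun (d : PySem.Dict String (List String)) (parent : String) => d.keys.foldl (fun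 d' key => if PySem.Set.contains (d'.getD key []) parent then d'.insert key (PySem.Set.union (d'.getD key []) (d.getD parent [])) else d') d) (rel.foldl (fun (d : PySem.Dict String (List String)) (item : String × String) => if d.contains item.1 then d.modify item.1 [] (fun s => PySem.Set.add s item.2) else d.insert item.1 (PySem.Set.ofList [item.1, item.2])) PySem.Dict.empty))).insert "TOP" (PySem.Set.ofList (PySem.Set.ofList (rel.foldl (fun (acc : List String × List String × List String) item => (acc.1 ++ [item.1, item.2], acc.2.1 ++ [item.1], acc.2.2 ++ [item.2])) ([], [], [])).1))).insert "BOTTOM" PySem.Set.empty)).items := rfl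
  have hB0 : create_lattice_dict_py_alt rel = (((((PySem.List.dedup (rel.foldl (fun (st : PySem.Dict String (List String) × List String × List String) item => (if st.1.contains item.1 then st.1.modify item.1 [] (fun s => PySem.Set.add s item.2) else st.1.insert item.1 (PySem.Set.ofList [item.1, item.2]), st.2.1 ++ [item.2], PySem.Set.add (PySem.Set.add st.2.2 item.1) item.2)) (PySem.Dict.empty, [], PySem.Set.empty)).2.1).foldl (fun (d : PySem.Dict String (List String)) (c : String) => if d.contains c then d else d.insert c (PySem.Set.ofList [c])) (rel.foldl (fun (st : PySem.Dict String (List String) × PySem.Dict String (List String)) (item : String × String) => (st.2.getD item.1 []).foldl (fun st' key => (st'.1.insert key (PySem.Set.union (st'.1.getD key []) (st.1.getD item.1 [])), (PySem.Set.diff (st.1.getD item.1 []) (st'.1.getD key [])).foldl (fun o elem => o.insert elem (PySem.Set.add (o.getD elem []) key)) st'.2)) st) ((rel.foldl (fun (st : PySem.Dict String (List String) × List String × List String) item => (if st.1.contains item.1 then st.1.modify item.1 [] (fun s => PySem.Set.add s item.2) else st.1.insert item.1 (PySem.Set.ofList [item.1, item.2]), st.2.1 ++ [item.2], PySem.Set.add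 (PySem.Set.add st.2.2 item.1) item.2)) (PySem.Dict.empty, [], PySem.Set.empty)).1, ((rel.foldl (fun (st : PySem.Dict String (List String) × List String × List String) item => (if st.1.contains item.1 then st.1.modify item.1 [] (fun s => PySem.Set.add s item.2) else st.1.insert item.1 (PySem.Set.ofList [item.1, item.2]), st.2.1 ++ [item.2], PySem.Set.add (PySem.Set.add st.2.2 item.1) item.2)) (PySem.Dict.empty, [], PySem.Set.empty)).1.items.foldl (fun (o : PySem.Dict String (List String)) (e : String × List String) => e.2.foldl (fun o elem => o.insert elem (PySem.Set.add (o.getD elem []) e.1)) o) PySem.Dict.empty))).1).insert "TOP" (rel.foldl (fun (st : PySem.Dict String (List String) × List String × List String) item => (if st.1.contains item.1 then st.1.modify item.1 [] (fun s => PySem.Set.add s item.2) else st.1.insert item.1 (PySem.Set.ofList [item.1, item.2]), st.2.1 ++ [item.2], PySem.Set.add (PySem.Set.add st.2.2 item.1) item.2)) (PySem.Dict.empty, [], PySem.Set.empty)).2.2).insert "BOTTOM" PySem.Set.empty)).items := rfl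
  rw [hA0, hB0]
  rw [PySem.List.foldl_prod_mk
        (f := fun (l : List String) (e : String × String) => l ++ [e.1, e.2])
        (g := fun (s2 : List String × List String) (e : String × String) => (s2.1 ++ [e.1], s2.2 ++ [e.2]))]
  rw [PySem.List.foldl_prod_mk
        (f := fun (l : List String) (e : String × String) => l ++ [e.1])
        (g := fun (l : List String) (e : String × String) => l ++ [e.2])]
  rw [PySem.List.foldl_prod_mk
        (f := (fun (d : PySem.Dict String (List String)) (item : String × String) => if d.contains item.1 then d.modify item.1 [] (fun s => PySem.Set.add s item.2) else d.insert item.1 (PySem.Set.ofList [item.1, item.2])))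
        (g := fun (s2 : List String × List String) (e : String × String) => (s2.1 ++ [e.2], PySem.Set.add (PySem.Set.add s2.2 e.1) e.2))]
  rw [PySem.List.foldl_prod_mk
        (f := fun (l : List String) (e : String × String) => l ++ [e.2])
        (g := fun (tp : List String) (e : String × String) => PySem.Set.add (PySem.Set.add tp e.1) e.2)]
  -- name the common dict-build fold
  rw [show (fun (d : PySem.Dict String (List String)) (item : String × String) => if d.contains item.1 = true then d.modify item.1 [] (fun s => PySem.Set.add s item.2) else d.insert item.1 (PySem.Set.ofList [item.1, item.2])) = pvBuild from rfl]
  -- flatten the three accumulator folds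
  rw [PySem.List.foldl_append_eq_flatMap (g := fun (e : String × String) => [e.1, e.2]) (l := rel) (acc := ([] : List String))]
  rw [PySem.List.foldl_append_singleton_eq_map (f := fun (e : String × String) => e.1) (l := rel) (acc := ([] : List String))]
  rw [PySem.List.foldl_append_singleton_eq_map (f := fun (e : String × String) => e.2) (l := rel) (acc := ([] : List String))]
  simp only [List.nil_append]
  -- the TOP set
  rw [pv_top_fold rel PySem.Set.empty]
  rw [show (rel.flatMap (fun (e : String × String) => [e.1, e.2])).foldl PySem.Set.add PySem.Set.empty = PySem.Set.ofList (rel.flatMap (fun (e : String × String) => [e.1, e.2])) from rfl]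
  rw [PySem.Set.ofList_ofList]
  -- B's propagation loop: fold over the relation through the first components
  rw [show (fun (st : PySem.Dict String (List String) × PySem.Dict String (List String)) (item : String × String) => (st.2.getD item.1 []).foldl (fun st' key => (st'.1.insert key (PySem.Set.union (st'.1.getD key []) (st.1.getD item.1 [])), (PySem.Set.diff (st.1.getD item.1 []) (st'.1.getD key [])).foldl (fun o elem => o.insert elem (PySem.Set.add (o.getD elem []) key)) st'.2)) st) = (fun (st : PySem.Dict String (List String) × PySem.Dict String (List String)) (item : String × String) => (st.2.getD item.1 []).foldl (pvBInner (st.1.getD item.1 [])) st) from rfl]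
  rw [← List.foldl_map (f := fun (e : String × String) => e.1) (g := fun (st : PySem.Dict String (List String) × PySem.Dict String (List String)) (p : String) => (st.2.getD p []).foldl (pvBInner (st.1.getD p [])) st) (l := rel) (init := ((rel.foldl pvBuild PySem.Dict.empty), ((rel.foldl pvBuild PySem.Dict.empty).items.foldl (fun (o : PySem.Dict String (List String)) (e : String × List String) => e.2.foldl (fun o elem => o.insert elem (PySem.Set.add (o.getD elem []) e.1)) o) PySem.Dict.empty)))]
  have hnd0 : (((rel.foldl pvBuild PySem.Dict.empty)).items.map Prod.fst).Nodup := pv_build_nodup rel PySem.Dict.empty (by rw [PySem.Dict.keys_empty]; exact List.nodup_nil)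
  have hI0 : pvInv (rel.foldl pvBuild PySem.Dict.empty) ((rel.foldl pvBuild PySem.Dict.empty).items.foldl (fun (o : PySem.Dict String (List String)) (e : String × List String) => e.2.foldl (fun o elem => o.insert elem (PySem.Set.add (o.getD elem []) e.1)) o) PySem.Dict.empty) := by
    intro e k
    rw [pv_occ0_build]
    simp [PySem.Dict.getD_empty]
  rw [pv_outer (rel.map (fun (e : String × String) => e.1)) (rel.foldl pvBuild PySem.Dict.empty) ((rel.foldl pvBuild PySem.Dict.empty).items.foldl (fun (o : PySem.Dict String (List String)) (e : String × List String) => e.2.foldl (fun o elem => o.insert elem (PySem.Set.add (o.getD elem []) e.1)) o) PySem.Dict.empty) hnd0 hI0]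
  -- keys of the built dict are the distinct parents
  have hkeys0 : ((rel.foldl pvBuild PySem.Dict.empty)).keys = PySem.Set.ofList (rel.map (fun (e : String × String) => e.1)) := by
    rw [pv_build_keys rel PySem.Dict.empty, PySem.Dict.keys_empty,
        ← PySem.Set.update_map_eq_foldl_add (l := rel) (f := fun (e : String × String) => e.1) (s := ([] : List String))]
    exact PySem.Set.update_empty _
  have hD1fst := pv_afold_fst (rel.map (fun (e : String × String) => e.1)) (rel.foldl pvBuild PySem.Dict.empty) hnd0
  have hD1keys : (((rel.map (fun (e : String × String) => e.1)).foldl (fun (d : PySem.Dict String (List String)) (parent : String) => d.keys.foldl (fun d' key => if PySem.Set.contains (d'.getD key []) parent then d'.insert key (PySem.Set.union (d'.getD key []) (d.getD parent [])) else d') d) (rel.foldl pvBuild PySem.Dict.empty))).keys = PySem.Set.ofList (rel.map (fun (e : String × String) => e.1)) := by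
    show (((rel.map (fun (e : String × String) => e.1)).foldl (fun (d : PySem.Dict String (List String)) (parent : String) => d.keys.foldl (fun d' key => if PySem.Set.contains (d'.getD key []) parent then d'.insert key (PySem.Set.union (d'.getD key []) (d.getD parent [])) else d') d) (rel.foldl pvBuild PySem.Dict.empty))).items.map Prod.fst = _
    rw [hD1fst.1]
    exact hkeys0
  -- singleton phase: both sides append the same fresh entries
  rw [PySem.List.dedup_eq_ofList]
  have hd2 : ((PySem.Set.diff (PySem.Set.ofList (rel.map (fun (e : String × String) => e.2))) (PySem.Set.ofList (rel.map (fun (e : String × String) => e.1)))).foldl (fun (d : PySem.Dict String (List String)) (s : String) => d.insert s (PySem.Set.ofList [s])) ((rel.map (fun (e : String × String) => e.1)).foldl (fun (d : PySem.Dict String (List String)) (parent : String) => d.keys.foldl (fun d' key => if PySem.Set.contains (d'.getD key []) parent then d'.insert key (PySem.Set.union (d'.getD key []) (d.getD parent [])) else d') d) (rel.foldl pvBuild PySem.Dict.empty))) = ((PySem.Set.ofList (rel.map (fun (e : String × String) => e.2))).foldl (fun (d : PySem.Dict String (List String)) (c : String) => if d.contains c then d else d.insert c (PySem.Set.ofList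 [c])) ((rel.map (fun (e : String × String) => e.1)).foldl (fun (d : PySem.Dict String (List String)) (parent : String) => d.keys.foldl (fun d' key => if PySem.Set.contains (d'.getD key []) parent then d'.insert key (PySem.Set.union (d'.getD key []) (d.getD parent [])) else d') d) (rel.foldl pvBuild PySem.Dict.empty))) := by
    apply PySem.Dict.ext
    rw [PySem.Dict.items_foldl_insert_fresh (PySem.Set.diff (PySem.Set.ofList (rel.map (fun (e : String × String) => e.2))) (PySem.Set.ofList (rel.map (fun (e : String × String) => e.1)))) (fun (a : String) => a) (fun (a : String) => PySem.Set.ofList [a]) ((rel.map (fun (e : String × String) => e.1)).foldl (fun (d : PySem.Dict String (List String)) (parent : String) => d.keys.foldl (fun d' key => if PySem.Set.contains (d'.getD key []) parent then d'.insert key (PySem.Set.union (d'.getD key []) (d.getD parent [])) else d') d) (rel.foldl pvBuild PySem.Dict.empty))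
          (fun a ha => by
            rcases (PySem.Set.mem_diff _ _ a).mp ha with ⟨_, hnp⟩
            rw [PySem.Dict.contains_eq_decide_mem_keys, hD1keys]
            simp [hnp])
          (by simpa using PySem.Set.nodup_diff _ _ (PySem.Set.nodup_ofList (rel.map (fun (e : String × String) => e.2))))]
    rw [pv_singl_fold (PySem.Set.ofList (rel.map (fun (e : String × String) => e.2))) ((rel.map (fun (e : String × String) => e.1)).foldl (fun (d : PySem.Dict String (List String)) (parent : String) => d.keys.foldl (fun d' key => if PySem.Set.contains (d'.getD key []) parent then d'.insert key (PySem.Set.union (d'.getD key []) (d.getD parent [])) else d') d) (rel.foldl pvBuild PySem.Dict.empty)) (PySem.Set.nodup_ofList _)]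
    congr 1
    rw [show (fun (a : String) => (a, PySem.Set.ofList [a])) = (fun (c : String) => (c, ([c] : List String))) from funext (fun a => rfl)]
    congr 1
    rw [show (PySem.Set.diff (PySem.Set.ofList (rel.map (fun (e : String × String) => e.2))) (PySem.Set.ofList (rel.map (fun (e : String × String) => e.1)))) = (PySem.Set.ofList (rel.map (fun (e : String × String) => e.2))).filter (fun x => !(PySem.Set.contains (PySem.Set.ofList (rel.map (fun (e : String × String) => e.1))) x)) from rfl]
    apply List.filter_congr
    intro c hc
    have h1 : (((rel.map (fun (e : String × String) => e.1)).foldl (fun (d : PySem.Dict String (List String)) (parent : String) => d.keys.foldl (fun d' key => if PySem.Set.contains (d'.getD key []) parent then d'.insert key (PySem.Set.union (d'.getD key []) (d.getD parent [])) else d') d) (rel.foldl pvBuild PySem.Dict.empty))).contains c = decide (c ∈ PySem.Set.ofList (rel.map (fun (e : String × String) => e.1))) := by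
      rw [PySem.Dict.contains_eq_decide_mem_keys, hD1keys]
    have h2 : PySem.Set.contains (PySem.Set.ofList (rel.map (fun (e : String × String) => e.1))) c = decide (c ∈ PySem.Set.ofList (rel.map (fun (e : String × String) => e.1))) := by
      by_cases hm : c ∈ PySem.Set.ofList (rel.map (fun (e : String × String) => e.1))
      · simp only [hm, decide_true]
        exact (PySem.Set.contains_iff _ _).mpr hm
      · simp only [hm, decide_false]
        exact Bool.eq_false_iff.mpr (fun hb => hm ((PySem.Set.contains_iff _ _).mp hb))
    rw [h1, h2]
  rw [hd2]

-- ===== VERDICT (by name: the statement is the Claim_ definition above) =====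
theorem create_lattice_dict_py_spec : Claim_equal_create_lattice_dict_py := by
  intro rel _
  show create_lattice_dict_py rel = create_lattice_dict_py_alt rel
  exact pv_main rel
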